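-- pv_equiv track=rewrite | github.com/Amarnath-Rao/DSA | re/Inverted-Index.py | search
-- ===== SOURCE A (Python) =====
-- def search(inverted_index, query):
--     query_words = query.lower().split(" and ")
--     result_sets = []
--     for word in query_words:
--         if word in inverted_index:
--             result_sets.append(set(inverted_index[word]['docs'].keys()))
--         else:
--             result_sets.append(set())
--     result = set.intersection(*result_sets) if result_sets else set()
--     return sorted(result)
-- ===== SOURCE B (Python) =====
-- def search(inverted_index, query):
--     query_words = query.lower().split(" and ")
--     counts = {}
--     for word in query_words:
--         entry = inverted_index.get(word)
--         if entry is not None: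
--             for doc in entry['docs']:
--                 counts[doc] = counts.get(doc, 0) + 1
--     need = len(query_words)
--     return sorted(doc for doc, c in counts.items() if c == need)
-- ===== Notes on version B (the rewrite author's own statement) =====
-- stated objective: alternative
-- what changed: Replaces A's per-word set construction plus set.intersection with a single tally (dict counting, per doc id, how many query words list it) followed by a threshold at len(query_words), then sorted.
import Mathlib
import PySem

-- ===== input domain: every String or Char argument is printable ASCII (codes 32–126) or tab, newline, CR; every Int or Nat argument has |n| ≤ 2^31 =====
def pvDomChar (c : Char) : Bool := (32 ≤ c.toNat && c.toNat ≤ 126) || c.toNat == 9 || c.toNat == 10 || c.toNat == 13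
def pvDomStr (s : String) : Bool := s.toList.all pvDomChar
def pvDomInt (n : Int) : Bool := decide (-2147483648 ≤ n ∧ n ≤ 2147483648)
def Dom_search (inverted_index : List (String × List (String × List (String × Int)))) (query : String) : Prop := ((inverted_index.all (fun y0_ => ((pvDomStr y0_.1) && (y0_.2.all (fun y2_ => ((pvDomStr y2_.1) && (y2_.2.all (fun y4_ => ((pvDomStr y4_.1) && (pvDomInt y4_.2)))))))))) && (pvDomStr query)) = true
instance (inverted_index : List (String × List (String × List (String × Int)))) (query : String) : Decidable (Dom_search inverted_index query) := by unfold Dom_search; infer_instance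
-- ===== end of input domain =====

-- B replaces A's per-word set construction + set.intersection by a single tally
-- (count, per doc id, how many query words list it) followed by a threshold at
-- len(query_words); same return value wherever A returns (objective: alternative).

-- ===== PORT A =====
def search (inverted_index : List (String × List (String × List (String × Int)))) (query : String) : List String :=
  -- query.lower().split(" and "): the separator is nonempty, so split? is always `some`; .getD [] is exact
  let query_words := (PySem.Str.split? (PySem.Str.lower query) " and ").getD []
  let result_sets : List (PySem.Set String) :=
    query_words.foldl (fun acc word =>
      match List.lookup word inverted_index with
      | some entry =>
          -- inverted_index[word]['docs'].keys(): a missing 'docs' key raises KeyError in Python;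
          -- Pre_search excludes exactly those inputs, .getD [] is only the total stand-in there
          acc ++ [PySem.Set.ofList (((List.lookup "docs" entry).getD []).map Prod.fst)]
      | none => acc ++ [(PySem.Set.empty : PySem.Set String)]) []
  let result : PySem.Set String :=
    match result_sets with
    | [] => PySem.Set.empty
    | s :: rest => rest.foldl PySem.Set.inter s
  PySem.List.sorted result (fun x => x) false

-- ===== PORT B =====
def search_alt (inverted_index : List (String × List (String × List (String × Int)))) (query : String) : List String :=
  let query_words := (PySem.Str.split? (PySem.Str.lower query) " and ").getD []
  let counts : PySem.Dict String Int :=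
    query_words.foldl (fun counts word =>
      match List.lookup word inverted_index with
      | some entry =>
          -- for doc in entry['docs']: iterates the docs dict's distinct keys in order
          -- (entry['docs'] raises KeyError when 'docs' is missing — excluded by Pre_search, .getD [] is the stand-in)
          (PySem.Set.ofList (((List.lookup "docs" entry).getD []).map Prod.fst)).foldl
            (fun c doc => c.insert doc (c.getD doc 0 + 1)) counts
      | none => counts) PySem.Dict.empty
  let need : Int := query_words.length
  PySem.List.sorted ((counts.items.filter (fun p => p.2 == need)).map Prod.fst) (fun x => x) false

-- ===== PRECONDITION & SPEC =====
-- Pre_search excludes exactly the inputs where Python A raises KeyError: a query word that is a key of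
-- inverted_index whose entry has no 'docs' key (B raises there too; no input on which A returns is excluded).
def Pre_search (inverted_index : List (String × List (String × List (String × Int)))) (query : String) : Prop :=
  ∀ w ∈ (PySem.Str.split? (PySem.Str.lower query) " and ").getD [],
    ((List.lookup w inverted_index).all fun entry => (List.lookup "docs" entry).isSome) = true
instance (inverted_index : List (String × List (String × List (String × Int)))) (query : String) : Decidable (Pre_search inverted_index query) := by unfold Pre_search; infer_instance

def pvWitness_search : (List (String × List (String × List (String × Int)))) × String :=
  ([("a", [("docs", [("d1", 1), ("d2", 2)])]), ("b", [("docs", [("d2", 3)])])], "a AND b")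

def Spec_search (inverted_index : List (String × List (String × List (String × Int)))) (query : String) (out : List String) : Prop := out = search_alt inverted_index query
instance (inverted_index : List (String × List (String × List (String × Int)))) (query : String) (out : List String) : Decidable (Spec_search inverted_index query out) := by unfold Spec_search; infer_instance

-- ===== CLAIM (what is proved, stated in full; the proofs are below) =====
def Claim_equal_search : Prop := ∀ (inverted_index : List (String × List (String × List (String × Int)))) (query : String), Dom_search inverted_index query → Pre_search inverted_index query → Spec_search inverted_index query (search inverted_index query)

-- ===== LEMMAS AND PROOFS =====

-- the per-word doc-id set both programs read off the index
def pvSets (inverted_index : List (String × List (String × List (String × Int)))) (w : String) : PySem.Set String :=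
  match List.lookup w inverted_index with
  | some entry => PySem.Set.ofList (((List.lookup "docs" entry).getD []).map Prod.fst)
  | none => PySem.Set.empty

lemma pvSets_nodup (ii : List (String × List (String × List (String × Int)))) (w : String) :
    (pvSets ii w).Nodup := by
  unfold pvSets
  cases List.lookup w ii with
  | none => exact List.nodup_nil
  | some e => exact PySem.Set.nodup_ofList _

-- A's intersection fold: membership and Nodup
lemma pv_mem_foldl_inter (rest : List (PySem.Set String)) (s0 : PySem.Set String) (d : String) :
    d ∈ rest.foldl PySem.Set.inter s0 ↔ d ∈ s0 ∧ ∀ t ∈ rest, d ∈ t := by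
  induction rest generalizing s0 with
  | nil => simp
  | cons t ts ih =>
      simp only [List.foldl_cons, ih, PySem.Set.mem_inter, List.mem_cons]
      constructor
      · rintro ⟨⟨h1, h2⟩, h3⟩; exact ⟨h1, fun u hu => hu.elim (fun e => e ▸ h2) (h3 u)⟩
      · rintro ⟨h1, h2⟩; exact ⟨⟨h1, h2 t (Or.inl rfl)⟩, fun u hu => h2 u (Or.inr hu)⟩

lemma pv_nodup_foldl_inter (rest : List (PySem.Set String)) (s0 : PySem.Set String)
    (h : s0.Nodup) : (rest.foldl PySem.Set.inter s0).Nodup := by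
  induction rest generalizing s0 with
  | nil => exact h
  | cons t ts ih => exact ih _ (PySem.Set.nodup_inter _ _ h)

-- B's tally loop, uniform shape (the `none` branch folds over the empty set)
lemma pv_step_eq (ii : List (String × List (String × List (String × Int)))) :
    (fun (counts : PySem.Dict String Int) word =>
      match List.lookup word ii with
      | some entry =>
          (PySem.Set.ofList (((List.lookup "docs" entry).getD []).map Prod.fst)).foldl
            (fun c doc => c.insert doc (c.getD doc 0 + 1)) counts
      | none => counts)
    = fun counts w => (pvSets ii w).foldl (fun c doc => c.insert doc (c.getD doc 0 + 1)) counts := by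
  funext counts w
  unfold pvSets
  cases List.lookup w ii <;> rfl

lemma pv_counts_getD (ii : List (String × List (String × List (String × Int))))
    (qws : List String) (d0 : PySem.Dict String Int) (v : String) :
    (qws.foldl (fun counts w => (pvSets ii w).foldl (fun c doc => c.insert doc (c.getD doc 0 + 1)) counts) d0).getD v 0
      = d0.getD v 0 + (qws.countP (fun w => decide (v ∈ pvSets ii w)) : Int) := by
  induction qws generalizing d0 with
  | nil => simp
  | cons w ws ih =>
      rw [List.foldl_cons, ih, PySem.Dict.getD_foldl_insert_add_one, List.countP_cons]
      have hcount : ((pvSets ii w).count v : Int) = if v ∈ pvSets ii w then 1 else 0 := by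
        by_cases h : v ∈ pvSets ii w
        · simp [h, List.count_eq_one_of_mem (pvSets_nodup ii w) h]
        · simp [h, List.count_eq_zero.mpr h]
      rw [hcount]
      by_cases h : v ∈ pvSets ii w
      · simp [h]; ring
      · simp [h]

lemma pv_counts_keys_mem (ii : List (String × List (String × List (String × Int))))
    (qws : List String) (d0 : PySem.Dict String Int) (v : String) :
    v ∈ (qws.foldl (fun counts w => (pvSets ii w).foldl (fun c doc => c.insert doc (c.getD doc 0 + 1)) counts) d0).keys
      ↔ v ∈ d0.keys ∨ ∃ w ∈ qws, v ∈ pvSets ii w := by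
  induction qws generalizing d0 with
  | nil => simp
  | cons w ws ih =>
      rw [List.foldl_cons, ih, PySem.Dict.keys_foldl_insert]
      simp only [PySem.Set.mem_update, List.mem_cons]
      constructor
      · rintro (⟨h | h⟩ | ⟨u, hu, hm⟩)
        · exact Or.inl h
        · exact Or.inr ⟨w, Or.inl rfl, h⟩
        · exact Or.inr ⟨u, Or.inr hu, hm⟩
      · rintro (h | ⟨u, (rfl | hu), hm⟩)
        · exact Or.inl (Or.inl h)
        · exact Or.inl (Or.inr hm)
        · exact Or.inr ⟨u, hu, hm⟩

lemma pv_counts_keys_nodup (ii : List (String × List (String × List (String × Int))))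
    (qws : List String) (d0 : PySem.Dict String Int) (h : d0.keys.Nodup) :
    (qws.foldl (fun counts w => (pvSets ii w).foldl (fun c doc => c.insert doc (c.getD doc 0 + 1)) counts) d0).keys.Nodup := by
  induction qws generalizing d0 with
  | nil => exact h
  | cons w ws ih => exact ih _ (PySem.Dict.nodup_keys_foldl_insert _ _ _ h)

-- membership in B's filtered item list
lemma pv_mem_filtered (counts : PySem.Dict String Int) (need : Int) (d : String)
    (hnd : counts.keys.Nodup) :
    d ∈ (counts.items.filter (fun p => p.2 == need)).map Prod.fst ↔ counts.get? d = some need := by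
  simp only [List.mem_map, List.mem_filter]
  constructor
  · rintro ⟨⟨k, c⟩, ⟨hmem, hc⟩, rfl⟩
    have : c = need := by simpa using hc
    subst this
    exact (PySem.Dict.get?_eq_some_iff_mem_items counts k c hnd).mpr hmem
  · intro h
    exact ⟨(d, need), ⟨PySem.Dict.mem_items_of_get?_eq_some counts h, by simp⟩, rfl⟩

lemma pv_nodup_filtered (counts : PySem.Dict String Int) (need : Int)
    (hnd : counts.keys.Nodup) :
    ((counts.items.filter (fun p => p.2 == need)).map Prod.fst).Nodup := by
  have hsub : ((counts.items.filter (fun p => p.2 == need)).map Prod.fst).Sublist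
      (counts.items.map Prod.fst) := List.filter_sublist.map _
  have : (counts.items.map Prod.fst).Nodup := by
    simpa [PySem.Dict.keys] using hnd
  exact this.sublist hsub

-- the two result lists agree for any query-word list
lemma pv_main (ii : List (String × List (String × List (String × Int)))) (qws : List String) :
    PySem.List.sorted
      (match qws.map (pvSets ii) with
       | [] => (PySem.Set.empty : PySem.Set String)
       | s :: rest => rest.foldl PySem.Set.inter s) (fun x => x) false
    = PySem.List.sorted
        (((qws.foldl (fun (counts : PySem.Dict String Int) w =>
            (pvSets ii w).foldl (fun c doc => c.insert doc (c.getD doc 0 + 1)) counts)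
            PySem.Dict.empty).items.filter (fun p => p.2 == (qws.length : Int))).map Prod.fst)
        (fun x => x) false := by
  cases qws with
  | nil => rfl
  | cons w0 ws =>
      have hknodup : ((w0 :: ws).foldl (fun (counts : PySem.Dict String Int) w =>
          (pvSets ii w).foldl (fun c doc => c.insert doc (c.getD doc 0 + 1)) counts)
          PySem.Dict.empty).keys.Nodup :=
        pv_counts_keys_nodup ii (w0 :: ws) _ (by simp [PySem.Dict.empty, PySem.Dict.keys])
      apply (PySem.List.sorted_id_eq_sorted_id_iff_perm _ _).mpr
      apply (List.perm_ext_iff_of_nodup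
        (by rw [List.map_cons]; exact pv_nodup_foldl_inter _ _ (pvSets_nodup ii w0))
        (pv_nodup_filtered _ _ hknodup)).mpr
      intro d
      rw [pv_mem_filtered _ _ _ hknodup, List.map_cons, pv_mem_foldl_inter]
      -- right side: get? d = some need ↔ d is in the tally with full count
      have hget : ∀ (counts : PySem.Dict String Int) (need : Int),
          counts.get? d = some need ↔ d ∈ counts.keys ∧ counts.getD d 0 = need := by
        intro counts need
        constructor
        · intro h
          refine ⟨(PySem.Dict.contains_iff_mem_keys counts d).mp
              (by rw [PySem.Dict.contains_eq_isSome_get?, h]; rfl), ?_⟩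
          rw [PySem.Dict.getD_eq_get?_getD, h]; rfl
        · rintro ⟨hk, hv⟩
          have hc : counts.contains d = true := (PySem.Dict.contains_iff_mem_keys counts d).mpr hk
          rw [PySem.Dict.contains_eq_isSome_get?] at hc
          cases hg : counts.get? d with
          | none => rw [hg] at hc; simp at hc
          | some c =>
              rw [PySem.Dict.getD_eq_get?_getD, hg] at hv
              simpa [hg] using congrArg some hv
      rw [hget, pv_counts_getD, pv_counts_keys_mem]
      simp only [PySem.Dict.keys_empty, PySem.Dict.getD_empty, List.not_mem_nil, false_or, zero_add]
      constructor
      · rintro ⟨h0, hrest⟩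
        have hall : ∀ w ∈ w0 :: ws, d ∈ pvSets ii w := by
          intro w hw
          rcases List.mem_cons.mp hw with rfl | hw
          · exact h0
          · exact hrest _ (List.mem_map_of_mem hw)
        refine ⟨⟨w0, List.mem_cons_self .., h0⟩, ?_⟩
        have : (w0 :: ws).countP (fun w => decide (d ∈ pvSets ii w)) = (w0 :: ws).length :=
          List.countP_eq_length.mpr (fun w hw => by simpa using hall w hw)
        exact_mod_cast this
      · rintro ⟨-, hcnt⟩
        have hcnt' : (w0 :: ws).countP (fun w => decide (d ∈ pvSets ii w)) = (w0 :: ws).length := by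
          exact_mod_cast hcnt
        have hall := List.countP_eq_length.mp hcnt'
        refine ⟨by simpa using hall w0 (List.mem_cons_self ..), ?_⟩
        rintro t ht
        rcases List.mem_map.mp ht with ⟨w, hw, rfl⟩
        simpa using hall w (List.mem_cons.mpr (Or.inr hw))

-- ===== VERDICT (by name: the statement is the Claim_ definition above) =====
set_option maxHeartbeats 1000000 in
theorem search_spec : Claim_equal_search := by
  intro ii q _ _
  unfold Spec_search
  simp only [search, search_alt]
  rw [pv_step_eq ii]
  have hres : ∀ qws : List String,
      (qws.foldl (fun acc word =>
        match List.lookup word ii with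
        | some entry => acc ++ [PySem.Set.ofList (((List.lookup "docs" entry).getD []).map Prod.fst)]
        | none => acc ++ [(PySem.Set.empty : PySem.Set String)]) [])
      = qws.map (pvSets ii) := by
    intro qws
    have hfun : (fun (acc : List (PySem.Set String)) word =>
        match List.lookup word ii with
        | some entry => acc ++ [PySem.Set.ofList (((List.lookup "docs" entry).getD []).map Prod.fst)]
        | none => acc ++ [(PySem.Set.empty : PySem.Set String)])
        = fun acc w => acc ++ [pvSets ii w] := by
      funext acc w
      unfold pvSets
      cases List.lookup w ii <;> rfl
    rw [hfun, PySem.List.foldl_append_singleton_eq_map, List.nil_append]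
  rw [hres]
  exact pv_main ii ((PySem.Str.split? (PySem.Str.lower q) " and ").getD [])
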